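-- pv_equiv track=rewrite | github.com/zeeeyeon/algorithm | sw_expert/22251. 원겸이의 문자열 정리하기 게임.py | find_ascii
-- ===== SOURCE A (Python) =====
-- def find_ascii(stack):
--     ascii_count = 0
--     ascii_stack = set()
--
--     for i in range(1, len(stack)):
--         if ord(stack[i-1]) + 1 == ord(stack[i]):
--             ascii_stack.add(stack[i-1])
--             ascii_stack.add(stack[i])
--         else:
--             ascii_count += len(ascii_stack)
--             ascii_stack = set()
--
--     ascii_count += len(ascii_stack)
--     return ascii_count
-- ===== SOURCE B (Python) =====
-- def find_ascii(stack):
--     n = len(stack)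
--     return sum(1 for i in range(n)
--                if (i > 0 and ord(stack[i-1]) + 1 == ord(stack[i]))
--                or (i + 1 < n and ord(stack[i]) + 1 == ord(stack[i+1])))
-- ===== Notes on version B (the rewrite author's own statement) =====
-- stated objective: simpler
-- what changed: Replaces A's stateful run machine (a set accumulated along each run and flushed at every break) by a stateless per-index characterization: a character counts iff it has a consecutive-ASCII neighbour on either side, so B is one comprehension counting indices that satisfy that local predicate, with no run state at all.
import Mathlib
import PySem

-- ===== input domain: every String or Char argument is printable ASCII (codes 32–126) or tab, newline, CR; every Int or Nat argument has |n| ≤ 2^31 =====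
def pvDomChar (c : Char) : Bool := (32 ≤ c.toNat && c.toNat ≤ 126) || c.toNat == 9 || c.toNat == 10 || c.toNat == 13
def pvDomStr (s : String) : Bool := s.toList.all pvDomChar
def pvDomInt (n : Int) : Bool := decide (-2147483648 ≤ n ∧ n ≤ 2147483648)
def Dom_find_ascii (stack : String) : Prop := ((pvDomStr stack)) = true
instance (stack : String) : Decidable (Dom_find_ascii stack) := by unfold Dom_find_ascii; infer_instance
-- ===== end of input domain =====

-- B drops A's run-tracking set entirely: it counts the indices whose character has a
-- consecutive-ASCII neighbour on either side (a stateless local predicate; objective: simpler).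

-- ===== PORT A =====
-- loop body of A: indices produced by range(1, len) are always in range, so the default ' ' is never used
def pvStepA (cs : List Char) (st : Int × PySem.Set Char) (i : Int) : Int × PySem.Set Char :=
  let a := PySem.List.pyGetD cs (i-1) ' '
  let b := PySem.List.pyGetD cs i ' '
  if ((a.toNat : Int) + 1 = (b.toNat : Int)) then
    (st.1, PySem.Set.add (PySem.Set.add st.2 a) b)
  else
    (st.1 + PySem.Set.len st.2, PySem.Set.empty)

def find_ascii (stack : String) : Int :=
  let cs := stack.toList
  let st := (PySem.List.pyRange 1 (PySem.Str.len stack) 1).foldl (pvStepA cs)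
              ((0 : Int), (PySem.Set.empty : PySem.Set Char))
  st.1 + PySem.Set.len st.2

-- ===== PORT B =====
-- the per-index predicate of B's comprehension (the and/or short-circuit guards keep all indexing in range)
def pvQualB (cs : List Char) (n : Int) (i : Int) : Bool :=
  (decide (0 < i) && ((PySem.List.pyGetD cs (i-1) ' ').toNat + 1 == (PySem.List.pyGetD cs i ' ').toNat))
  || (decide (i+1 < n) && ((PySem.List.pyGetD cs i ' ').toNat + 1 == (PySem.List.pyGetD cs (i+1) ' ').toNat))

def find_ascii_alt (stack : String) : Int :=
  let cs := stack.toList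
  let n := PySem.Str.len stack
  (PySem.List.pyRange 0 n 1).foldl (fun total i => if pvQualB cs n i then total + 1 else total) 0

-- ===== PRECONDITION & SPEC =====
def Spec_find_ascii (stack : String) (out : Int) : Prop := out = find_ascii_alt stack
instance (stack : String) (out : Int) : Decidable (Spec_find_ascii stack out) := by unfold Spec_find_ascii; infer_instance

-- ===== CLAIM (what is proved, stated in full; the proofs are below) =====
def Claim_equal_find_ascii : Prop := ∀ (stack : String), Dom_find_ascii stack → Spec_find_ascii stack (find_ascii stack)

-- ===== LEMMAS AND PROOFS =====

-- Nat-level versions of the step test and B's predicate, used only by the proofs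
def pvStepN (cs : List Char) (j k : Nat) : Bool :=
  (cs.getD j ' ').toNat + 1 == (cs.getD k ' ').toNat

def pvQualN (cs : List Char) (n i : Nat) : Bool :=
  (decide (0 < i) && pvStepN cs (i-1) i) || (decide (i+1 < n) && pvStepN cs i (i+1))

def pvCnt (cs : List Char) (n m : Nat) : Nat := (List.range m).countP (pvQualN cs n)

lemma pvQualB_cast (cs : List Char) (n i : Nat) :
    pvQualB cs (n : Int) (i : Int) = pvQualN cs n i := by
  unfold pvQualB pvQualN pvStepN
  by_cases h0 : 0 < i
  · have h1 : ((i : Int) - 1) = ((i - 1 : Nat) : Int) := by omega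
    have h2 : ((i : Int) + 1) = ((i + 1 : Nat) : Int) := by omega
    rw [h1, h2]
    simp only [PySem.List.pyGetD_natCast, Nat.cast_pos, Nat.cast_lt]
  · have hi : i = 0 := by omega
    subst hi
    have e1 : (((0 : Nat) : Int) + 1) = ((1 : Nat) : Int) := by norm_num
    rw [e1]
    simp only [PySem.List.pyGetD_natCast, Nat.cast_pos, Nat.cast_lt]
    simp

-- B's fold is the Nat-level count
lemma pvB_eq_cnt (cs : List Char) (m : Nat) :
    (PySem.List.pyRange 0 (m : Int) 1).foldl
        (fun total i => if pvQualB cs (m : Int) i then total + 1 else total) 0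
      = (pvCnt cs m m : Int) := by
  rw [PySem.List.pyRange_zero_natCast, PySem.List.foldl_if_add_one, List.countP_map]
  unfold pvCnt
  have hc : (List.range m).countP ((pvQualB cs (m : Int)) ∘ fun k => ((k : Nat) : Int))
      = (List.range m).countP (pvQualN cs m) :=
    List.countP_congr (fun i _ => by simp only [Function.comp_apply, pvQualB_cast])
  rw [hc]
  simp

-- for i+1 < n the predicate does not depend on extending n
lemma pvQualN_mono (cs : List Char) (n i : Nat) (h : i + 1 < n) :
    pvQualN cs (n+1) i = pvQualN cs n i := by
  unfold pvQualN
  simp [decide_eq_true h, decide_eq_true (show i < n by omega)]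

-- simulation invariant for A's fold: acc + |set| equals the prefix count, and the set is the
-- current (strictly increasing) run ending at position n-1
lemma pvSim (cs : List Char) : ∀ (n : Nat), n ≤ cs.length →
    (let st := (PySem.List.pyRange 1 (n:Int) 1).foldl (pvStepA cs)
                  ((0 : Int), (PySem.Set.empty : PySem.Set Char))
     st.1 + PySem.Set.len st.2 = (pvCnt cs n n : Int)
     ∧ ((st.2 = [] ∧ (n < 2 ∨ pvStepN cs (n-2) (n-1) = false))
        ∨ (2 ≤ n ∧ pvStepN cs (n-2) (n-1) = true
           ∧ cs.getD (n-1) ' ' ∈ st.2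
           ∧ ∀ x ∈ st.2, x.toNat ≤ (cs.getD (n-1) ' ').toNat))) := by
  intro n
  induction n with
  | zero =>
    intro _
    rw [PySem.List.pyRange_one_eq_nil (by norm_num)]
    exact ⟨rfl, Or.inl ⟨rfl, Or.inl (by norm_num)⟩⟩
  | succ n ih =>
    intro hn
    by_cases h1 : n = 0
    · subst h1
      rw [PySem.List.pyRange_one_eq_nil (by norm_num)]
      refine ⟨?_, Or.inl ⟨rfl, Or.inl (by norm_num)⟩⟩
      have h : pvCnt cs 1 1 = 0 := by simp [pvCnt, pvQualN, List.countP, List.countP.go]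
      show (0 : Int) + PySem.Set.len PySem.Set.empty = ((pvCnt cs 1 1 : Nat) : Int)
      rw [h]
      rfl
    · have hn1 : 1 ≤ n := Nat.one_le_iff_ne_zero.mpr h1
      have hlt : n < cs.length := hn
      have hsplit : PySem.List.pyRange 1 ((n+1 : Nat) : Int) 1
          = PySem.List.pyRange 1 (n : Int) 1 ++ [(n : Int)] := by
        push_cast
        exact PySem.List.pyRange_one_succ_right (by exact_mod_cast hn1)
      obtain ⟨ihc, ihs⟩ := ih (Nat.le_of_succ_le hn)
      rw [hsplit, List.foldl_append]
      simp only [List.foldl_cons, List.foldl_nil, Nat.add_sub_cancel]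
      -- the two characters of the step
      have hidx : ((n : Int) - 1) = (((n-1 : Nat)) : Int) := by omega
      have ha : PySem.List.pyGetD cs ((n : Int) - 1) ' ' = cs.getD (n-1) ' ' := by
        rw [hidx, PySem.List.pyGetD_natCast]
      have hb : PySem.List.pyGetD cs (n : Int) ' ' = cs.getD n ' ' := by
        rw [PySem.List.pyGetD_natCast]
      -- count bookkeeping: range (n+1) = range (n-1) ++ [n-1] ++ [n], with the first block invariant
      have hcut : pvCnt cs (n+1) (n+1)
          = (List.range (n-1)).countP (pvQualN cs n)
            + (if pvQualN cs (n+1) (n-1) then 1 else 0)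
            + (if pvQualN cs (n+1) n then 1 else 0) := by
        unfold pvCnt
        have hr1 : List.range (n+1) = List.range n ++ [n] := List.range_succ
        have hr2 : List.range n = List.range (n-1) ++ [n-1] := by
          conv_lhs => rw [show n = (n-1) + 1 by omega]
          exact List.range_succ
        rw [hr1, hr2, List.countP_append, List.countP_append]
        have hcg : (List.range (n-1)).countP (pvQualN cs (n+1))
            = (List.range (n-1)).countP (pvQualN cs n) := by
          refine List.countP_congr (fun i hi => ?_)
          have : i < n - 1 := List.mem_range.mp hi
          rw [pvQualN_mono cs n i (by omega)]
        rw [hcg]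
        simp [List.countP_cons]
      have hcutn : pvCnt cs n n
          = (List.range (n-1)).countP (pvQualN cs n)
            + (if pvQualN cs n (n-1) then 1 else 0) := by
        unfold pvCnt
        have hr2 : List.range n = List.range (n-1) ++ [n-1] := by
          conv_lhs => rw [show n = (n-1) + 1 by omega]
          exact List.range_succ
        rw [hr2, List.countP_append]
        simp [List.countP_cons]
      set sA := ((PySem.List.pyRange 1 (n:Int) 1).foldl (pvStepA cs)
                  ((0 : Int), (PySem.Set.empty : PySem.Set Char))) with hsA
      unfold pvStepA
      simp only [ha, hb]
      set a := cs.getD (n-1) ' ' with hadef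
      set b := cs.getD n ' ' with hbdef
      have hstep : pvStepN cs (n-1) n = ((a.toNat : Int) + 1 = (b.toNat : Int) : Bool) := by
        unfold pvStepN
        rw [← hadef, ← hbdef]
        by_cases h : a.toNat + 1 = b.toNat
        · have h' : ((a.toNat : Int) + 1 = (b.toNat : Int)) := by exact_mod_cast h
          simp [h, h']
        · have h' : ¬((a.toNat : Int) + 1 = (b.toNat : Int)) := by
            intro hc; apply h; exact_mod_cast hc
          simp [h, h']
      have hsub1 : (n + 1) - 2 = n - 1 := by omega
      have hsub2 : (n + 1) - 1 = n := by omega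
      by_cases hcond : ((a.toNat : Int) + 1 = (b.toNat : Int))
      · -- consecutive pair: the run grows by b
        have hstepT : pvStepN cs (n-1) n = true := by rw [hstep]; simp [hcond]
        have hab : a ≠ b := by
          intro h; rw [h] at hcond; omega
        rw [if_pos hcond]
        -- qual values
        have hqn : pvQualN cs (n+1) n = true := by
          unfold pvQualN
          simp [hstepT, show 0 < n by omega]
        have hqn1 : pvQualN cs (n+1) (n-1) = true := by
          unfold pvQualN
          have : (n-1) + 1 = n := by omega
          simp [this, hstepT, show n < n + 1 by omega]
        rcases ihs with ⟨hs0, hprev⟩ | ⟨hn2, hprevT, hmem, hbound⟩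
        · -- fresh run: set was empty, both n-1 and n are newly counted
          have hqold : pvQualN cs n (n-1) = false := by
            unfold pvQualN
            rcases hprev with hl | hr
            · have hn1' : n = 1 := by omega
              subst hn1'
              simp [pvStepN]
            · have h' : (n-1) + 1 = n := by omega
              have hsub : (n-1) - 1 = n - 2 := by omega
              simp [h', hsub, hr]
          rw [hs0]
          have hpair : PySem.Set.add (PySem.Set.add ([] : PySem.Set Char) a) b = [a, b] := by
            rw [PySem.Set.add_of_not_mem (List.not_mem_nil (a := a)),
                PySem.Set.add_of_not_mem (show b ∉ ([] : List Char) ++ [a] by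
                  simp [Ne.symm hab])]
            rfl
          rw [hpair]
          refine ⟨?_, Or.inr ⟨by omega, hstepT, by simp, ?_⟩⟩
          · simp only [hqn, hqn1] at hcut
            simp at hcut
            rw [hs0] at ihc
            simp [PySem.Set.len] at ihc ⊢
            simp [hqold] at hcutn
            omega
          · intro x hx
            rcases List.mem_pair.mp hx with h | h <;> subst h <;> omega
        · -- mid-run: a already in the set, b is new
          have hadda : PySem.Set.add sA.2 a = sA.2 := PySem.Set.add_of_mem hmem
          have hbnot : b ∉ sA.2 := by
            intro hbmem
            have := hbound b hbmem
            omega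
          have haddb : PySem.Set.add sA.2 b = sA.2 ++ [b] := PySem.Set.add_of_not_mem hbnot
          have hqold : pvQualN cs n (n-1) = true := by
            unfold pvQualN
            have hsub : (n-1) - 1 = n - 2 := by omega
            simp [hsub, hprevT, show 0 < n - 1 by omega]
          rw [hadda, haddb]
          refine ⟨?_, Or.inr ⟨by omega, hstepT,
            List.mem_append.mpr (Or.inr (by simp)), ?_⟩⟩
          · simp only [hqn, hqn1] at hcut
            simp at hcut
            simp [hqold] at hcutn
            simp [PySem.Set.len] at ihc ⊢
            omega
          · intro x hx
            rcases List.mem_append.mp hx with h | h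
            · have := hbound x h; omega
            · simp at h; subst h; omega
      · -- break: the run is flushed, no index is newly counted
        have hstepF : pvStepN cs (n-1) n = false := by
          rw [hstep]; simpa using hcond
        rw [if_neg hcond]
        have hqn : pvQualN cs (n+1) n = false := by
          unfold pvQualN
          simp [hstepF]
        have hqn1 : pvQualN cs (n+1) (n-1) = pvQualN cs n (n-1) := by
          unfold pvQualN
          have h : (n-1) + 1 = n := by omega
          simp [h, hstepF]
        refine ⟨?_, Or.inl ⟨rfl, Or.inr hstepF⟩⟩
        simp only [hqn1, hqn] at hcut
        simp at hcut
        simp [PySem.Set.len, PySem.Set.empty] at ihc ⊢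
        omega

-- ===== VERDICT (by name: the statement is the Claim_ definition above) =====
theorem find_ascii_spec : Claim_equal_find_ascii := by
  intro stack _
  unfold Spec_find_ascii find_ascii find_ascii_alt
  dsimp only
  have hlen : PySem.Str.len stack = ((stack.toList.length : Nat) : Int) := by simp
  rw [hlen]
  obtain ⟨hc, _⟩ := pvSim stack.toList stack.toList.length (le_refl _)
  rw [hc, pvB_eq_cnt]
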